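-- pv_equiv track=rewrite | github.com/yuesong-feng/FM-Agent | src/reasoner.py | _compute_brace_depth_per_line
-- ===== SOURCE A (Python) =====
-- def _compute_brace_depth_per_line(lines):
--     """
--     Compute brace depth after each line, respecting strings and comments.
--     Returns list of depths (depth after processing each line).
--     """
--     depths = []
--     depth = 0
--     for line in lines:
--         i = 0
--         while i < len(line):
--             ch = line[i]
--             # Skip string literals
--             if ch == '"':
--                 i += 1
--                 while i < len(line):
--                     if line[i] == '\\':
--                         i += 2
--                         continue
--                     if line[i] == '"':
--                         i += 1
--                         break
--                     i += 1
--                 continue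
--             # Skip char literals
--             if ch == "'":
--                 i += 1
--                 while i < len(line):
--                     if line[i] == '\\':
--                         i += 2
--                         continue
--                     if line[i] == "'":
--                         i += 1
--                         break
--                     i += 1
--                 continue
--             # Line comment — skip rest of line
--             if ch == '/' and i + 1 < len(line) and line[i + 1] == '/':
--                 break
--             # Block comment
--             if ch == '/' and i + 1 < len(line) and line[i + 1] == '*':
--                 i += 2
--                 while i < len(line):
--                     if line[i] == '*' and i + 1 < len(line) and line[i + 1] == '/':
--                         i += 2
--                         break
--                     i += 1
--                 # If block comment spans lines, we ignore braces inside it (simplified)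
--                 continue
--             if ch == '{':
--                 depth += 1
--             elif ch == '}':
--                 depth -= 1
--             i += 1
--         depths.append(depth)
--     return depths
-- ===== SOURCE B (Python) =====
-- def _compute_brace_depth_per_line(lines):
--     """Per-line flat state machine (mode + skip flag) instead of nested index loops."""
--     NORMAL, STRING, CHAR, BLOCK = 0, 1, 2, 3
--     depths = []
--     depth = 0
--     for line in lines:
--         mode = NORMAL
--         skip = False  # next char already consumed (escape or two-char token)
--         for j, ch in enumerate(line):
--             if skip:
--                 skip = False
--                 continue
--             if mode == NORMAL:
--                 nxt = line[j + 1] if j + 1 < len(line) else ''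
--                 if ch == '/' and nxt == '/':
--                     break
--                 if ch == '/' and nxt == '*':
--                     mode = BLOCK
--                     skip = True
--                 elif ch == '"':
--                     mode = STRING
--                 elif ch == "'":
--                     mode = CHAR
--                 elif ch == '{':
--                     depth += 1
--                 elif ch == '}':
--                     depth -= 1
--             elif mode == STRING:
--                 if ch == '\\':
--                     skip = True
--                 elif ch == '"':
--                     mode = NORMAL
--             elif mode == CHAR:
--                 if ch == '\\':
--                     skip = True
--                 elif ch == "'":
--                     mode = NORMAL
--             else:  # BLOCK
--                 if ch == '*' and j + 1 < len(line) and line[j + 1] == '/':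
--                     mode = NORMAL
--                     skip = True
--         depths.append(depth)
--     return depths
-- ===== Notes on version B (the rewrite author's own statement) =====
-- stated objective: idiomatic
-- what changed: Replaced the nested index-arithmetic while-loops (separate inner scans for string/char/block-comment) by a single per-line flat state machine: one loop over the characters with an explicit mode (NORMAL/STRING/CHAR/BLOCK) and a skip flag.
import Mathlib
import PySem

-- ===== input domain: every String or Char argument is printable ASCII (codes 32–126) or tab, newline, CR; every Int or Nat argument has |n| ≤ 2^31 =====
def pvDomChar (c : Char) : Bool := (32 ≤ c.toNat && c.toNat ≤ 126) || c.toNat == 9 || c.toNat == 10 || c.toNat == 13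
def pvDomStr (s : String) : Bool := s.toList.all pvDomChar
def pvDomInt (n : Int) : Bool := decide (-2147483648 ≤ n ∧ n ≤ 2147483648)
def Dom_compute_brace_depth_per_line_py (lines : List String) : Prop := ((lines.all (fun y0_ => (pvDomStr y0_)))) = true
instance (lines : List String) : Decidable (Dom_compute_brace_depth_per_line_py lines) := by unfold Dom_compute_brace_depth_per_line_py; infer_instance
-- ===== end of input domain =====

-- B replaces A's nested index-arithmetic inner while-loops by a single per-line
-- flat state machine (mode + skip flag); same cost, plainer control flow.


-- ===== PORT A =====
-- cited by the ports' termination proofs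
theorem pvTailLe {α : Type} (l : List α) : l.tail.length ≤ l.length := by
  cases l <;> simp

-- A's inner while loop skipping a string/char literal (q = closing quote); returns the rest of the line
def pvSkipLit (q : Char) : List Char → List Char
  | [] => []
  | c :: rest =>
    if c = '\\' then pvSkipLit q rest.tail          -- i += 2
    else if c = q then rest                          -- i += 1; break
    else pvSkipLit q rest                            -- i += 1
termination_by cs => cs.length
decreasing_by
  · exact Nat.lt_succ_of_le (pvTailLe _)
  · simp

-- A's inner while loop skipping a block comment body; returns the rest of the line
def pvSkipBlock : List Char → List Char
  | [] => []
  | c :: rest =>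
    if c = '*' ∧ rest.head? = some '/' then rest.tail   -- i += 2; break
    else pvSkipBlock rest

-- cited by pvScanA's termination proof
theorem pvSkipLit_length_le (q : Char) : ∀ (n : ℕ) (cs : List Char), cs.length ≤ n →
    (pvSkipLit q cs).length ≤ cs.length := by
  intro n
  induction n with
  | zero =>
    intro cs h
    rw [List.length_eq_zero_iff.mp (Nat.le_zero.mp h)]
    simp [pvSkipLit]
  | succ n ih =>
    intro cs h
    cases cs with
    | nil => simp [pvSkipLit]
    | cons c rest =>
      have hr : rest.length ≤ n := Nat.lt_succ_iff.mp h
      rw [pvSkipLit]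
      by_cases h1 : c = '\\'
      · rw [if_pos h1]
        have := ih rest.tail (le_trans (pvTailLe _) hr)
        have := pvTailLe rest
        simp only [List.length_cons]; omega
      rw [if_neg h1]
      by_cases h2 : c = q
      · rw [if_pos h2]; simp
      · rw [if_neg h2]
        exact Nat.le_succ_of_le (ih rest hr)

-- cited by pvScanA's termination proof
theorem pvSkipBlock_length_le (cs : List Char) : (pvSkipBlock cs).length ≤ cs.length := by
  induction cs with
  | nil => simp [pvSkipBlock]
  | cons c rest ih =>
    rw [pvSkipBlock]
    split
    · exact Nat.le_succ_of_le (pvTailLe _)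
    · exact Nat.le_succ_of_le ih

-- A's outer while loop over one line
def pvScanA (depth : Int) : List Char → Int
  | [] => depth
  | c :: rest =>
    if c = '"' then pvScanA depth (pvSkipLit '"' rest)
    else if c = '\'' then pvScanA depth (pvSkipLit '\'' rest)
    else if c = '/' ∧ rest.head? = some '/' then depth            -- line comment: break
    else if c = '/' ∧ rest.head? = some '*' then pvScanA depth (pvSkipBlock rest.tail)
    else if c = '{' then pvScanA (depth + 1) rest
    else if c = '}' then pvScanA (depth - 1) rest
    else pvScanA depth rest
termination_by cs => cs.length
decreasing_by
  · exact Nat.lt_succ_of_le (pvSkipLit_length_le _ rest.length rest le_rfl)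
  · exact Nat.lt_succ_of_le (pvSkipLit_length_le _ rest.length rest le_rfl)
  · exact Nat.lt_succ_of_le (le_trans (pvSkipBlock_length_le _) (pvTailLe _))
  · simp
  · simp
  · simp

def compute_brace_depth_per_line_py (lines : List String) : List Int :=
  (lines.foldl (fun (st : List Int × Int) line =>
      let d := pvScanA st.2 line.toList
      (st.1 ++ [d], d)) ([], 0)).1

-- ===== PORT B =====
inductive PvMode | normal | str | chr | block
deriving DecidableEq, Repr

-- B's single per-line loop: mode + skip-flag state machine
def pvScanB (mode : PvMode) (skip : Bool) (depth : Int) : List Char → Int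
  | [] => depth
  | c :: rest =>
    match skip, mode with
    | true, _ => pvScanB mode false depth rest
    | false, .normal =>
        if c = '/' ∧ rest.head? = some '/' then depth
        else if c = '/' ∧ rest.head? = some '*' then pvScanB .block true depth rest
        else if c = '"' then pvScanB .str false depth rest
        else if c = '\'' then pvScanB .chr false depth rest
        else if c = '{' then pvScanB .normal false (depth + 1) rest
        else if c = '}' then pvScanB .normal false (depth - 1) rest
        else pvScanB .normal false depth rest
    | false, .str =>
        if c = '\\' then pvScanB .str true depth rest
        else if c = '"' then pvScanB .normal false depth rest
        else pvScanB .str false depth rest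
    | false, .chr =>
        if c = '\\' then pvScanB .chr true depth rest
        else if c = '\'' then pvScanB .normal false depth rest
        else pvScanB .chr false depth rest
    | false, .block =>
        if c = '*' ∧ rest.head? = some '/' then pvScanB .normal true depth rest
        else pvScanB .block false depth rest

def compute_brace_depth_per_line_py_alt (lines : List String) : List Int :=
  (lines.foldl (fun (st : List Int × Int) line =>
      let d := pvScanB .normal false st.2 line.toList
      (st.1 ++ [d], d)) ([], 0)).1

-- ===== PRECONDITION & SPEC =====
def Spec_compute_brace_depth_per_line_py (lines : List String) (out : List Int) : Prop := out = compute_brace_depth_per_line_py_alt lines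
instance (lines : List String) (out : List Int) : Decidable (Spec_compute_brace_depth_per_line_py lines out) := by unfold Spec_compute_brace_depth_per_line_py; infer_instance

-- ===== CLAIM (what is proved, stated in full; the proofs are below) =====
def Claim_equal_compute_brace_depth_per_line_py : Prop := ∀ (lines : List String), Dom_compute_brace_depth_per_line_py lines → Spec_compute_brace_depth_per_line_py lines (compute_brace_depth_per_line_py lines)

-- ===== LEMMAS AND PROOFS =====

theorem pvScanB_nil (m : PvMode) (s : Bool) (d : Int) : pvScanB m s d [] = d := rfl

theorem pvScanB_cons_skip (m : PvMode) (d : Int) (c : Char) (rest : List Char) :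
    pvScanB m true d (c :: rest) = pvScanB m false d rest := rfl

theorem pvScanB_cons_normal (d : Int) (c : Char) (rest : List Char) :
    pvScanB .normal false d (c :: rest) =
      (if c = '/' ∧ rest.head? = some '/' then d
       else if c = '/' ∧ rest.head? = some '*' then pvScanB .block true d rest
       else if c = '"' then pvScanB .str false d rest
       else if c = '\'' then pvScanB .chr false d rest
       else if c = '{' then pvScanB .normal false (d + 1) rest
       else if c = '}' then pvScanB .normal false (d - 1) rest
       else pvScanB .normal false d rest) := rfl

theorem pvScanB_cons_str (d : Int) (c : Char) (rest : List Char) :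
    pvScanB .str false d (c :: rest) =
      (if c = '\\' then pvScanB .str true d rest
       else if c = '"' then pvScanB .normal false d rest
       else pvScanB .str false d rest) := rfl

theorem pvScanB_cons_chr (d : Int) (c : Char) (rest : List Char) :
    pvScanB .chr false d (c :: rest) =
      (if c = '\\' then pvScanB .chr true d rest
       else if c = '\'' then pvScanB .normal false d rest
       else pvScanB .chr false d rest) := rfl

theorem pvScanB_cons_block (d : Int) (c : Char) (rest : List Char) :
    pvScanB .block false d (c :: rest) =
      (if c = '*' ∧ rest.head? = some '/' then pvScanB .normal true d rest
       else pvScanB .block false d rest) := rfl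

-- scanning with the skip flag set consumes one char then proceeds unflagged
theorem pvScanB_skip (m : PvMode) (d : Int) (cs : List Char) :
    pvScanB m true d cs = pvScanB m false d cs.tail := by
  cases cs with
  | nil => rw [pvScanB_nil, List.tail_nil, pvScanB_nil]
  | cons c rest => rw [pvScanB_cons_skip, List.tail_cons]

-- STRING mode scans exactly the literal skipped by pvSkipLit '"', then resumes NORMAL
theorem pvScanB_str (d : Int) : ∀ (n : ℕ) (cs : List Char), cs.length ≤ n →
    pvScanB .str false d cs = pvScanB .normal false d (pvSkipLit '"' cs) := by
  intro n
  induction n with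
  | zero =>
    intro cs h
    rw [List.length_eq_zero_iff.mp (Nat.le_zero.mp h)]
    simp [pvSkipLit, pvScanB_nil]
  | succ n ih =>
    intro cs h
    cases cs with
    | nil => simp [pvSkipLit, pvScanB_nil]
    | cons c rest =>
      have hr : rest.length ≤ n := Nat.lt_succ_iff.mp h
      rw [pvScanB_cons_str, pvSkipLit]
      by_cases h1 : c = '\\'
      · rw [if_pos h1, if_pos h1, pvScanB_skip, ih _ (le_trans (pvTailLe _) hr)]
      rw [if_neg h1, if_neg h1]
      by_cases h2 : c = '"'
      · rw [if_pos h2, if_pos h2]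
      · rw [if_neg h2, if_neg h2, ih _ hr]

-- CHAR mode scans exactly the literal skipped by pvSkipLit '\'', then resumes NORMAL
theorem pvScanB_chr (d : Int) : ∀ (n : ℕ) (cs : List Char), cs.length ≤ n →
    pvScanB .chr false d cs = pvScanB .normal false d (pvSkipLit '\'' cs) := by
  intro n
  induction n with
  | zero =>
    intro cs h
    rw [List.length_eq_zero_iff.mp (Nat.le_zero.mp h)]
    simp [pvSkipLit, pvScanB_nil]
  | succ n ih =>
    intro cs h
    cases cs with
    | nil => simp [pvSkipLit, pvScanB_nil]
    | cons c rest =>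
      have hr : rest.length ≤ n := Nat.lt_succ_iff.mp h
      rw [pvScanB_cons_chr, pvSkipLit]
      by_cases h1 : c = '\\'
      · rw [if_pos h1, if_pos h1, pvScanB_skip, ih _ (le_trans (pvTailLe _) hr)]
      rw [if_neg h1, if_neg h1]
      by_cases h2 : c = '\''
      · rw [if_pos h2, if_pos h2]
      · rw [if_neg h2, if_neg h2, ih _ hr]

-- BLOCK mode scans exactly the comment body skipped by pvSkipBlock, then resumes NORMAL
theorem pvScanB_blk (d : Int) (cs : List Char) :
    pvScanB .block false d cs = pvScanB .normal false d (pvSkipBlock cs) := by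
  induction cs with
  | nil => simp [pvSkipBlock, pvScanB_nil]
  | cons c rest ih =>
    rw [pvScanB_cons_block, pvSkipBlock]
    by_cases h : c = '*' ∧ rest.head? = some '/'
    · rw [if_pos h, if_pos h, pvScanB_skip]
    · rw [if_neg h, if_neg h, ih]

-- main per-line lemma: A's nested-loop scan equals B's state machine started in NORMAL
theorem pvScan_eq : ∀ (n : ℕ) (cs : List Char), cs.length ≤ n → ∀ (depth : Int),
    pvScanA depth cs = pvScanB .normal false depth cs := by
  intro n
  induction n with
  | zero =>
    intro cs h depth
    rw [List.length_eq_zero_iff.mp (Nat.le_zero.mp h)]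
    rw [pvScanA, pvScanB_nil]
  | succ n ih =>
    intro cs h depth
    cases cs with
    | nil => rw [pvScanA, pvScanB_nil]
    | cons c rest =>
      have hr : rest.length ≤ n := Nat.lt_succ_iff.mp h
      rw [pvScanA, pvScanB_cons_normal]
      by_cases h3 : c = '/' ∧ rest.head? = some '/'
      · have hq : ¬ c = '"' := by rw [h3.1]; decide
        have hq' : ¬ c = '\'' := by rw [h3.1]; decide
        rw [if_neg hq, if_neg hq', if_pos h3, if_pos h3]
      by_cases h4 : c = '/' ∧ rest.head? = some '*'
      · have hq : ¬ c = '"' := by rw [h4.1]; decide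
        have hq' : ¬ c = '\'' := by rw [h4.1]; decide
        rw [if_neg hq, if_neg hq', if_neg h3, if_pos h4, if_neg h3, if_pos h4,
          pvScanB_skip, pvScanB_blk,
          ih _ (le_trans (pvSkipBlock_length_le _) (le_trans (pvTailLe _) hr))]
      by_cases h1 : c = '"'
      · rw [if_pos h1, if_neg h3, if_neg h4, if_pos h1,
          ih _ (le_trans (pvSkipLit_length_le _ rest.length rest le_rfl) hr),
          pvScanB_str depth rest.length rest le_rfl]
      by_cases h2 : c = '\''
      · rw [if_neg h1, if_pos h2, if_neg h3, if_neg h4, if_neg h1, if_pos h2,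
          ih _ (le_trans (pvSkipLit_length_le _ rest.length rest le_rfl) hr),
          pvScanB_chr depth rest.length rest le_rfl]
      by_cases h5 : c = '{'
      · rw [if_neg h1, if_neg h2, if_neg h3, if_neg h4, if_pos h5,
          if_neg h3, if_neg h4, if_neg h1, if_neg h2, if_pos h5, ih _ hr]
      by_cases h6 : c = '}'
      · rw [if_neg h1, if_neg h2, if_neg h3, if_neg h4, if_neg h5, if_pos h6,
          if_neg h3, if_neg h4, if_neg h1, if_neg h2, if_neg h5, if_pos h6, ih _ hr]
      · rw [if_neg h1, if_neg h2, if_neg h3, if_neg h4, if_neg h5, if_neg h6,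
          if_neg h3, if_neg h4, if_neg h1, if_neg h2, if_neg h5, if_neg h6, ih _ hr]

theorem pvFold_eq (lines : List String) : ∀ (st : List Int × Int),
    lines.foldl (fun (st : List Int × Int) line =>
      let d := pvScanA st.2 line.toList
      (st.1 ++ [d], d)) st
    = lines.foldl (fun (st : List Int × Int) line =>
      let d := pvScanB .normal false st.2 line.toList
      (st.1 ++ [d], d)) st := by
  induction lines with
  | nil => intro st; rfl
  | cons l rest ih =>
    intro st
    simp only [List.foldl_cons]
    rw [pvScan_eq l.toList.length l.toList le_rfl st.2, ih]

-- ===== VERDICT (by name: the statement is the Claim_ definition above) =====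
theorem compute_brace_depth_per_line_py_spec : Claim_equal_compute_brace_depth_per_line_py := by
  intro lines _
  unfold Spec_compute_brace_depth_per_line_py compute_brace_depth_per_line_py compute_brace_depth_per_line_py_alt
  rw [pvFold_eq]
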